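-- pv_equiv track=rewrite | github.com/PermutaTriangle/comb_spec_searcher | atrap/strategies/row_column_separation.py | inequality_word_helper
-- ===== SOURCE A (Python) =====
-- from copy import copy
--
-- def inequality_word_helper( word_so_far, keys, inequalities, original_keys ):
--     if keys:
--         new_keys = copy(keys)
--         next_key = new_keys.pop(0)
--         min_value = 0
--         max_value = len(inequalities)
--         for position in range(len(word_so_far)):
--             value_of_position = word_so_far[position]
--             key_of_position = original_keys[position]
--             if key_of_position in inequalities[next_key]:
--                 if min_value < value_of_position:
--                     min_value = value_of_position
--                 if next_key in inequalities[key_of_position]: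
--                     if max_value > value_of_position + 1:
--                         max_value = value_of_position + 1
--             elif next_key in inequalities[key_of_position]:
--                 if max_value > value_of_position + 1:
--                     max_value = value_of_position + 1
--             else:
--                 if min_value < value_of_position:
--                     min_value = value_of_position
--                 if max_value > value_of_position + 1:
--                     max_value = value_of_position + 1
--             if min_value >= max_value:
--                 return []
--         if new_keys:
--             L = []
--             for letter in range(min_value, max_value):
--                 L = L + [ [letter] + word for word in inequality_word_helper( word_so_far + [letter], new_keys, inequalities, original_keys ) ]
--             return L
--         else:
--             letters_used = set(word_so_far)
--             unused_letters_needed = []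
--             for i in range(len(letters_used)):
--                 if i not in word_so_far:
--                     if unused_letters_needed:
--                         return []
--                     unused_letters_needed.append(i)
--             if unused_letters_needed:
--                 unused_letter_needed = unused_letters_needed[0]
--                 if unused_letter_needed >= min_value and unused_letter_needed < max_value:
--                     return [ [unused_letter_needed] ]
--             else:
--                 new_max = len(letters_used)
--                 if new_max >= min_value and new_max < max_value:
--                     return [ [new_max] ]
--                 else:
--                     if max_value == min_value + 1:
--                         return [ [min_value] ]
--             return []
--     else:
--         return [[]]
-- ===== SOURCE B (Python) =====
-- def inequality_word_helper(word_so_far, keys, inequalities, original_keys):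
--     # Iterative DFS with an explicit stack (top = last element); bounds via
--     # max/min over comprehensions, leaf case via a missing-letter list.
--     out = []
--     stack = [(word_so_far, keys, [])]
--     while stack:
--         word, ks, prefix = stack.pop()
--         if not ks:
--             out.append(prefix)
--             continue
--         next_key, rest = ks[0], ks[1:]
--         pairs = list(zip(word, original_keys))
--         lo = max([0] + [v for v, k in pairs
--                         if k in inequalities[next_key] or next_key not in inequalities[k]])
--         hi = min([len(inequalities)] + [v + 1 for v, k in pairs
--                                         if next_key in inequalities[k] or k not in inequalities[next_key]])
--         if lo >= hi:
--             continue
--         if rest: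
--             for letter in reversed(range(lo, hi)):
--                 stack.append((word + [letter], rest, prefix + [letter]))
--         else:
--             n = len(set(word))
--             missing = [i for i in range(n) if i not in word]
--             if len(missing) > 1:
--                 continue
--             x = missing[0] if missing else n
--             if lo <= x < hi:
--                 out.append(prefix + [x])
--             elif not missing and hi == lo + 1:
--                 out.append(prefix + [lo])
--     return out
-- ===== Notes on version B (the rewrite author's own statement) =====
-- stated objective: alternative
-- what changed: A's recursion is replaced by an iterative DFS over an explicit stack of (word, remaining keys, prefix) states; the letter bounds are computed as max/min over comprehensions of zipped (value, key) pairs instead of A's early-returning index loop, and the leaf case is rewritten via a missing-letter list instead of A's early-returning scan.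
-- outside the precondition, e.g. on inequality_word_helper([2, 0], [0], {0: []}, [0, 9]): A returns [], B raises KeyError; on inequality_word_helper([0, 1], [4, 1], {4: [1], 1: [1]}, [1, 1]): A returns [], B returns []
import Mathlib
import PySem

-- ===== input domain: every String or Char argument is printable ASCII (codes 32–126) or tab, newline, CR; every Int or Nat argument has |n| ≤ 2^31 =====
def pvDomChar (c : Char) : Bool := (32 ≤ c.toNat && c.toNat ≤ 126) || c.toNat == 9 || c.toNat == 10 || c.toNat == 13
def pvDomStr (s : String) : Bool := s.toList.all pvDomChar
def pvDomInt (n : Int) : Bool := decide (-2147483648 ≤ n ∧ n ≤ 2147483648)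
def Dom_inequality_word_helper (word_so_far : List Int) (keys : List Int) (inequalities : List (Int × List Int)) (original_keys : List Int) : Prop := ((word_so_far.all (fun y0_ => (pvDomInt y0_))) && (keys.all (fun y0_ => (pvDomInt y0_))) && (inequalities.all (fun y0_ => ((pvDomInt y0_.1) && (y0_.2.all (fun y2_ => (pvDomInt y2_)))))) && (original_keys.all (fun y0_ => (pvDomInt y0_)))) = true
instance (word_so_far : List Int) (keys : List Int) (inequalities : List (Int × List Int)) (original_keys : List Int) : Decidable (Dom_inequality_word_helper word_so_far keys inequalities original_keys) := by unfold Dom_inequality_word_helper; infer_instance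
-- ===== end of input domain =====

-- B replaces A's recursion by an iterative DFS over an explicit stack, computes the letter bounds by
-- max/min over zipped pairs instead of A's early-returning index loop, and rewrites the leaf case via a
-- missing-letter list (objective: alternative; equal return values on Pre_).

-- ===== PORT A =====
-- inequalities[k] (dict lookup); default [] is unreachable under Pre_
def pvRowA (ineq : List (Int × List Int)) (k : Int) : List Int :=
  (PySem.Dict.mk ineq).getD k []

-- A's 'for position in range(len(word_so_far))' bound loop; 'none' = the early 'return []'
def pvBoundsA (ineq : List (Int × List Int)) (next_key : Int) (w ok : List Int) :
    List Int → Int → Int → Option (Int × Int)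
  | [], mn, mx => some (mn, mx)
  | p :: ps, mn, mx =>
    let v := (PySem.List.pyGet? w p).getD 0
    let k := (PySem.List.pyGet? ok p).getD 0
    let s :=
      if (pvRowA ineq next_key).contains k then
        (if mn < v then v else mn,
         if (pvRowA ineq k).contains next_key then (if v + 1 < mx then v + 1 else mx) else mx)
      else if (pvRowA ineq k).contains next_key then
        (mn, if v + 1 < mx then v + 1 else mx)
      else
        (if mn < v then v else mn, if v + 1 < mx then v + 1 else mx)
    if s.1 ≥ s.2 then none else pvBoundsA ineq next_key w ok ps s.1 s.2

-- A's 'for i in range(len(letters_used))' loop; 'none' = the early 'return []'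
def pvMissingA (w : List Int) : List Int → List Int → Option (List Int)
  | [], acc => some acc
  | i :: is, acc =>
    if !(w.contains i) then
      if acc ≠ [] then none else pvMissingA w is (acc ++ [i])
    else pvMissingA w is acc

def inequality_word_helper (word_so_far : List Int) (keys : List Int) (inequalities : List (Int × List Int)) (original_keys : List Int) : List (List Int) :=
  match keys with
  | [] => [[]]
  | next_key :: new_keys =>
    match pvBoundsA inequalities next_key word_so_far original_keys
        (PySem.List.pyRange 0 (PySem.List.len word_so_far) 1) 0 (PySem.List.len inequalities) with
    | none => []
    | some s =>
      let min_value := s.1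
      let max_value := s.2
      if new_keys ≠ [] then
        (PySem.List.pyRange min_value max_value 1).foldl
          (fun L letter =>
            L ++ (inequality_word_helper (word_so_far ++ [letter]) new_keys inequalities original_keys).map
                  (fun word => [letter] ++ word)) []
      else
        let letters_used : PySem.Set Int := PySem.Set.ofList word_so_far
        match pvMissingA word_so_far (PySem.List.pyRange 0 (PySem.Set.len letters_used) 1) [] with
        | none => []
        | some unused =>
          if unused ≠ [] then
            let x := unused.headD 0  -- unused_letters_needed[0]; the list is nonempty in this branch
            if x ≥ min_value ∧ x < max_value then [[x]] else []
          else
            let new_max := PySem.Set.len letters_used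
            if new_max ≥ min_value ∧ new_max < max_value then [[new_max]]
            else if max_value = min_value + 1 then [[min_value]] else []

-- ===== PORT B =====
-- inequalities[k] (dict lookup); default [] is unreachable under Pre_
def pvRowB (ineq : List (Int × List Int)) (k : Int) : List Int :=
  (PySem.Dict.mk ineq).getD k []

-- B's  max([0] + [v for v, k in pairs if k in inequalities[next_key] or next_key not in inequalities[k]])
-- (the list is nonempty, so the .getD default is unreachable)
def pvLoB (ineq : List (Int × List Int)) (next_key : Int) (pairs : List (Int × Int)) : Int :=
  (PySem.List.max? ((0 : Int) :: (pairs.filter (fun p =>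
      (pvRowB ineq next_key).contains p.2 || !((pvRowB ineq p.2).contains next_key))).map (·.1))
    (fun y => y)).getD 0

-- B's  min([len(inequalities)] + [v + 1 for v, k in pairs if next_key in inequalities[k] or k not in inequalities[next_key]])
def pvHiB (ineq : List (Int × List Int)) (next_key : Int) (pairs : List (Int × Int)) : Int :=
  (PySem.List.min? ((PySem.List.len ineq) :: (pairs.filter (fun p =>
      (pvRowB ineq p.2).contains next_key || !((pvRowB ineq next_key).contains p.2))).map (fun p => p.1 + 1))
    (fun y => y)).getD 0

-- cited by pvStackLoop's termination argument
lemma pvLoB_nonneg (ineq : List (Int × List Int)) (nk : Int) (pairs : List (Int × Int)) :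
    0 ≤ pvLoB ineq nk pairs := by
  unfold pvLoB
  rw [PySem.List.max?_id_cons]
  exact (PySem.List.le_foldl_max _ _).1

-- cited by pvStackLoop's termination argument
lemma pvHiB_le_len (ineq : List (Int × List Int)) (nk : Int) (pairs : List (Int × Int)) :
    pvHiB ineq nk pairs ≤ (ineq.length : Int) := by
  unfold pvHiB
  rw [PySem.List.min?_id_cons]
  simpa [PySem.List.len] using (PySem.List.foldl_min_le _ _).1

-- B's  n = len(set(word)) / missing = [i for i in range(n) if i not in word] / x = missing[0] if missing else n
def pvNB (word : List Int) : Int := PySem.Set.len (PySem.Set.ofList word)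
def pvMissingB (word : List Int) : List Int :=
  (PySem.List.pyRange 0 (pvNB word) 1).filter (fun i => !(word.contains i))
def pvXB (word : List Int) : Int :=
  match pvMissingB word with | [] => pvNB word | m :: _ => m

-- B's while-loop over the explicit stack.  The stack is kept TOP-FIRST (Python's list keeps the top
-- last, so Python pushes reversed(range(lo, hi)) where this pushes the range in order; pop = head).
def pvStackLoop (ineq : List (Int × List Int)) (ok : List Int) :
    List (List Int × List Int × List Int) → List (List Int) → List (List Int)
  | [], out => out
  | (_word, [], pref) :: rest_stack, out => pvStackLoop ineq ok rest_stack (out ++ [pref])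
  | (word, next_key :: rest, pref) :: rest_stack, out =>
    let pairs := word.zip ok
    let lo := pvLoB ineq next_key pairs
    let hi := pvHiB ineq next_key pairs
    if lo ≥ hi then pvStackLoop ineq ok rest_stack out
    else if rest ≠ [] then
      pvStackLoop ineq ok
        (((PySem.List.pyRange lo hi 1).map (fun letter => (word ++ [letter], rest, pref ++ [letter]))) ++ rest_stack)
        out
    else
      if PySem.List.len (pvMissingB word) > 1 then pvStackLoop ineq ok rest_stack out
      else if lo ≤ pvXB word ∧ pvXB word < hi then
        pvStackLoop ineq ok rest_stack (out ++ [pref ++ [pvXB word]])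
      else if pvMissingB word = [] ∧ hi = lo + 1 then
        pvStackLoop ineq ok rest_stack (out ++ [pref ++ [lo]])
      else pvStackLoop ineq ok rest_stack out
  termination_by stack _ => (stack.map (fun s => (ineq.length + 1) ^ (s.2.1.length + 1))).sum
  decreasing_by
  · simp only [List.map_cons, List.sum_cons]
    exact Nat.lt_add_of_pos_left (Nat.pow_pos (Nat.succ_pos _))
  · simp only [List.map_cons, List.sum_cons]
    exact Nat.lt_add_of_pos_left (Nat.pow_pos (Nat.succ_pos _))
  · simp only [List.map_cons, List.sum_cons, List.map_append, List.sum_append, List.map_map,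
      List.length_cons, Function.comp_def]
    have hlo := pvLoB_nonneg ineq next_key (word.zip ok)
    have hhi := pvHiB_le_len ineq next_key (word.zip ok)
    have hcnt : (PySem.List.pyRange (pvLoB ineq next_key (word.zip ok))
        (pvHiB ineq next_key (word.zip ok)) 1).length ≤ ineq.length := by
      rw [PySem.List.length_pyRange_one]; omega
    have hconst : (List.map (fun _ : Int => (ineq.length + 1) ^ (rest.length + 1))
        (PySem.List.pyRange (pvLoB ineq next_key (word.zip ok)) (pvHiB ineq next_key (word.zip ok)) 1)).sum
        = (PySem.List.pyRange (pvLoB ineq next_key (word.zip ok))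
            (pvHiB ineq next_key (word.zip ok)) 1).length * (ineq.length + 1) ^ (rest.length + 1) := by
      rw [List.map_const', List.sum_replicate]; simp [smul_eq_mul]
    rw [hconst]
    have hpw : 0 < (ineq.length + 1) ^ (rest.length + 1) := Nat.pow_pos (Nat.succ_pos _)
    have hlt : (PySem.List.pyRange (pvLoB ineq next_key (word.zip ok))
        (pvHiB ineq next_key (word.zip ok)) 1).length * (ineq.length + 1) ^ (rest.length + 1)
        < (ineq.length + 1) ^ (rest.length + 1 + 1) := by
      rw [pow_succ]
      calc (PySem.List.pyRange (pvLoB ineq next_key (word.zip ok))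
            (pvHiB ineq next_key (word.zip ok)) 1).length * (ineq.length + 1) ^ (rest.length + 1)
          ≤ ineq.length * (ineq.length + 1) ^ (rest.length + 1) :=
            Nat.mul_le_mul_right _ hcnt
        _ < (ineq.length + 1) ^ (rest.length + 1) * (ineq.length + 1) := by
            have := Nat.lt_succ_self ineq.length
            nlinarith [hpw]
    omega
  · simp only [List.map_cons, List.sum_cons]
    exact Nat.lt_add_of_pos_left (Nat.pow_pos (Nat.succ_pos _))
  · simp only [List.map_cons, List.sum_cons]
    exact Nat.lt_add_of_pos_left (Nat.pow_pos (Nat.succ_pos _))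
  · simp only [List.map_cons, List.sum_cons]
    exact Nat.lt_add_of_pos_left (Nat.pow_pos (Nat.succ_pos _))
  · simp only [List.map_cons, List.sum_cons]
    exact Nat.lt_add_of_pos_left (Nat.pow_pos (Nat.succ_pos _))

def inequality_word_helper_alt (word_so_far : List Int) (keys : List Int) (inequalities : List (Int × List Int)) (original_keys : List Int) : List (List Int) :=
  pvStackLoop inequalities original_keys [(word_so_far, keys, [])] []

-- ===== PRECONDITION & SPEC =====
-- the two membership conditions of the bound computation, and the running max / min they induce
-- (used by Pre_'s empty-bounds disjunct and by the proofs)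
def pvCmin (ineq : List (Int × List Int)) (nk : Int) (p : Int × Int) : Bool :=
  ((PySem.Dict.mk ineq).getD nk []).contains p.2 || !(((PySem.Dict.mk ineq).getD p.2 []).contains nk)
def pvCmax (ineq : List (Int × List Int)) (nk : Int) (p : Int × Int) : Bool :=
  ((PySem.Dict.mk ineq).getD p.2 []).contains nk || !(((PySem.Dict.mk ineq).getD nk []).contains p.2)

def pvLoF (ineq : List (Int × List Int)) (nk : Int) (pairs : List (Int × Int)) (mn : Int) : Int :=
  pairs.foldl (fun m p => if pvCmin ineq nk p then max m p.1 else m) mn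
def pvHiF (ineq : List (Int × List Int)) (nk : Int) (pairs : List (Int × Int)) (mx : Int) : Int :=
  pairs.foldl (fun m p => if pvCmax ineq nk p then min m (p.1 + 1) else m) mx

-- Pre_ excludes exactly the inputs on which the dict lookups inequalities[·] or the indexing
-- original_keys[position] can raise in A (or in B).  Lookups happen only inside the position loop, so
-- nothing is required when keys = [], when word_so_far = [] and keys is a single key (the loop never
-- runs), or when word_so_far = [] and inequalities = {} (the letter range is empty).  Otherwise every
-- consulted key (all of keys, except the first one when word_so_far = [], and the consulted prefix of
-- original_keys) must be present in inequalities, and original_keys must reach every indexed position.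
-- A fourth disjunct admits the inputs whose level-0 letter range is already empty (both programs
-- return [] there without any deeper lookup).  This is still slightly narrower than 'A returns': when
-- A's early 'return []' fires mid-loop before a missing key / short list is reached, A still returns [].
def Pre_inequality_word_helper (word_so_far : List Int) (keys : List Int) (inequalities : List (Int × List Int)) (original_keys : List Int) : Prop :=
  keys = [] ∨
  (word_so_far = [] ∧ inequalities = []) ∨
    (word_so_far.length + keys.length ≤ original_keys.length + 1 ∧
     (∀ k ∈ (if word_so_far = [] then keys.tail else keys),
        (PySem.Dict.mk inequalities).contains k = true) ∧
     (∀ k ∈ original_keys.take (word_so_far.length + keys.length - 1),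
        (PySem.Dict.mk inequalities).contains k = true)) ∨
  (keys ≠ [] ∧ word_so_far.length ≤ original_keys.length ∧
   (PySem.Dict.mk inequalities).contains (keys.headD 0) = true ∧
   (∀ k ∈ original_keys.take word_so_far.length,
      (PySem.Dict.mk inequalities).contains k = true) ∧
   pvLoF inequalities (keys.headD 0) (word_so_far.zip original_keys) 0 ≥
     pvHiF inequalities (keys.headD 0) (word_so_far.zip original_keys) (inequalities.length : Int))
instance (word_so_far : List Int) (keys : List Int) (inequalities : List (Int × List Int)) (original_keys : List Int) : Decidable (Pre_inequality_word_helper word_so_far keys inequalities original_keys) := by unfold Pre_inequality_word_helper; infer_instance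

def pvWitness_inequality_word_helper : List Int × List Int × (List (Int × List Int)) × List Int :=
  ([], [0], [(0, [])], [])

def Spec_inequality_word_helper (word_so_far : List Int) (keys : List Int) (inequalities : List (Int × List Int)) (original_keys : List Int) (out : List (List Int)) : Prop := out = inequality_word_helper_alt word_so_far keys inequalities original_keys
instance (word_so_far : List Int) (keys : List Int) (inequalities : List (Int × List Int)) (original_keys : List Int) (out : List (List Int)) : Decidable (Spec_inequality_word_helper word_so_far keys inequalities original_keys out) := by unfold Spec_inequality_word_helper; infer_instance

-- ===== CLAIM (what is proved, stated in full; the proofs are below) =====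
def Claim_equal_inequality_word_helper : Prop := ∀ (word_so_far : List Int) (keys : List Int) (inequalities : List (Int × List Int)) (original_keys : List Int), Dom_inequality_word_helper word_so_far keys inequalities original_keys → Pre_inequality_word_helper word_so_far keys inequalities original_keys → Spec_inequality_word_helper word_so_far keys inequalities original_keys (inequality_word_helper word_so_far keys inequalities original_keys)


-- ===== LEMMAS AND PROOFS =====

-- A's bound loop re-expressed on the (value, key) pairs
def pvPairB (ineq : List (Int × List Int)) (nk : Int) : List (Int × Int) → Int → Int → Option (Int × Int)
  | [], mn, mx => some (mn, mx)
  | p :: ps, mn, mx =>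
    let s :=
      if (pvRowA ineq nk).contains p.2 then
        (if mn < p.1 then p.1 else mn,
         if (pvRowA ineq p.2).contains nk then (if p.1 + 1 < mx then p.1 + 1 else mx) else mx)
      else if (pvRowA ineq p.2).contains nk then
        (mn, if p.1 + 1 < mx then p.1 + 1 else mx)
      else
        (if mn < p.1 then p.1 else mn, if p.1 + 1 < mx then p.1 + 1 else mx)
    if s.1 ≥ s.2 then none else pvPairB ineq nk ps s.1 s.2

lemma pvLoF_ge (ineq : List (Int × List Int)) (nk : Int) (pairs : List (Int × Int)) (mn : Int) :
    mn ≤ pvLoF ineq nk pairs mn := by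
  induction pairs generalizing mn with
  | nil => simp [pvLoF]
  | cons p ps ih =>
    simp only [pvLoF, List.foldl_cons]
    refine le_trans ?_ (ih (if pvCmin ineq nk p then max mn p.1 else mn))
    split <;> simp [le_max_left]

lemma pvHiF_le (ineq : List (Int × List Int)) (nk : Int) (pairs : List (Int × Int)) (mx : Int) :
    pvHiF ineq nk pairs mx ≤ mx := by
  induction pairs generalizing mx with
  | nil => simp [pvHiF]
  | cons p ps ih =>
    simp only [pvHiF, List.foldl_cons]
    refine le_trans (ih (if pvCmax ineq nk p then min mx (p.1 + 1) else mx)) ?_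
    split <;> simp [min_le_left]

lemma pvPairB_eq (ineq : List (Int × List Int)) (nk : Int) (pairs : List (Int × Int)) (mn mx : Int) :
    pvPairB ineq nk pairs mn mx =
      if pvLoF ineq nk pairs mn ≥ pvHiF ineq nk pairs mx then
        (if pairs.isEmpty then some (mn, mx) else none)
      else some (pvLoF ineq nk pairs mn, pvHiF ineq nk pairs mx) := by
  induction pairs generalizing mn mx with
  | nil =>
    simp only [pvPairB, pvLoF, pvHiF, List.foldl_nil, List.isEmpty_nil]
    split_ifs <;> rfl
  | cons p ps ih =>
    have hstep : (if (pvRowA ineq nk).contains p.2 then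
          (if mn < p.1 then p.1 else mn,
           if (pvRowA ineq p.2).contains nk then (if p.1 + 1 < mx then p.1 + 1 else mx) else mx)
        else if (pvRowA ineq p.2).contains nk then
          (mn, if p.1 + 1 < mx then p.1 + 1 else mx)
        else
          (if mn < p.1 then p.1 else mn, if p.1 + 1 < mx then p.1 + 1 else mx))
        = (if pvCmin ineq nk p then max mn p.1 else mn,
           if pvCmax ineq nk p then min mx (p.1 + 1) else mx) := by
      simp only [pvCmin, pvCmax, pvRowA, pvRowB]
      rcases Bool.eq_false_or_eq_true (((PySem.Dict.mk ineq).getD nk []).contains p.2) with hc1 | hc1 <;>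
        rcases Bool.eq_false_or_eq_true (((PySem.Dict.mk ineq).getD p.2 []).contains nk) with hc2 | hc2 <;>
          simp only [hc1, hc2, Bool.false_or, Bool.true_or, Bool.or_false, Bool.or_true,
            Bool.not_true, Bool.not_false, Bool.false_eq_true, Bool.true_eq_false, if_true,
            if_false, Prod.mk.injEq] <;>
          constructor <;> first | trivial | (split_ifs <;> omega)
    have hlocons : pvLoF ineq nk (p :: ps) mn
        = pvLoF ineq nk ps (if pvCmin ineq nk p then max mn p.1 else mn) := by
      simp only [pvLoF, List.foldl_cons]
    have hhicons : pvHiF ineq nk (p :: ps) mx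
        = pvHiF ineq nk ps (if pvCmax ineq nk p then min mx (p.1 + 1) else mx) := by
      simp only [pvHiF, List.foldl_cons]
    simp only [pvPairB]
    rw [hstep, hlocons, hhicons]
    set a := if pvCmin ineq nk p then max mn p.1 else mn with ha
    set b := if pvCmax ineq nk p then min mx (p.1 + 1) else mx with hb
    simp only []
    by_cases hge : a ≥ b
    · rw [if_pos hge, if_pos (le_trans (pvHiF_le ineq nk ps b) (le_trans hge (pvLoF_ge ineq nk ps a)))]
      simp
    · rw [if_neg hge, ih a b]
      by_cases hcond : pvLoF ineq nk ps a ≥ pvHiF ineq nk ps b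
      · rw [if_pos hcond, if_pos hcond]
        cases ps with
        | nil =>
          exfalso
          simp only [pvLoF, pvHiF, List.foldl_nil] at hcond
          exact hge hcond
        | cons q qs => simp
      · rw [if_neg hcond, if_neg hcond]

lemma pvBoundsA_append (ineq : List (Int × List Int)) (nk : Int) (w ok l1 l2 : List Int) (mn mx : Int) :
    pvBoundsA ineq nk w ok (l1 ++ l2) mn mx =
      (pvBoundsA ineq nk w ok l1 mn mx).bind (fun s => pvBoundsA ineq nk w ok l2 s.1 s.2) := by
  induction l1 generalizing mn mx with
  | nil => simp [pvBoundsA]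
  | cons p ps ih =>
    simp only [List.cons_append, pvBoundsA]
    split_ifs <;> first | rfl | exact ih _ _

lemma pvPairB_append (ineq : List (Int × List Int)) (nk : Int) (l1 l2 : List (Int × Int)) (mn mx : Int) :
    pvPairB ineq nk (l1 ++ l2) mn mx =
      (pvPairB ineq nk l1 mn mx).bind (fun s => pvPairB ineq nk l2 s.1 s.2) := by
  induction l1 generalizing mn mx with
  | nil => simp [pvPairB]
  | cons p ps ih =>
    simp only [List.cons_append, pvPairB]
    split_ifs <;> first | rfl | exact ih _ _

lemma pvZipTake {α β : Type} (l : List α) (l' : List β) : l.zip (l'.take l.length) = l.zip l' := by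
  induction l generalizing l' with
  | nil => simp
  | cons a as ih =>
    cases l' with
    | nil => simp
    | cons b bs => simp [List.zip_cons_cons, ih]

lemma pvBridge (ineq : List (Int × List Int)) (nk : Int) (w ok : List Int) (n : Nat)
    (hw : n ≤ w.length) (hok : n ≤ ok.length) (mn mx : Int) :
    pvBoundsA ineq nk w ok ((List.range n).map (fun (k : Nat) => (k : Int))) mn mx =
      pvPairB ineq nk ((w.take n).zip (ok.take n)) mn mx := by
  induction n generalizing mn mx with
  | zero => simp [pvBoundsA, pvPairB]
  | succ n ihn =>
    have hn : n < w.length := by omega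
    have hkn : n < ok.length := by omega
    rw [List.range_succ, List.map_append, pvBoundsA_append,
      ihn (by omega) (by omega),
      List.take_add_one, List.take_add_one,
      List.getElem?_eq_getElem hn, List.getElem?_eq_getElem hkn]
    simp only [Option.toList_some]
    rw [List.zip_append (by simp [List.length_take]; omega), pvPairB_append]
    apply Option.bind_congr
    intro s _
    simp only [List.map_cons, List.map_nil, List.zip_cons_cons, List.zip_nil_right,
      pvBoundsA, pvPairB, PySem.List.pyGet?_natCast,
      List.getElem?_eq_getElem hn, List.getElem?_eq_getElem hkn, Option.getD_some]

lemma pvBoundsA_eq (ineq : List (Int × List Int)) (nk : Int) (w ok : List Int)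
    (h : w.length ≤ ok.length) (mn mx : Int) :
    pvBoundsA ineq nk w ok (PySem.List.pyRange 0 (PySem.List.len w) 1) mn mx =
      pvPairB ineq nk (w.zip ok) mn mx := by
  have hlen : PySem.List.len w = (w.length : Int) := by simp [PySem.List.len]
  rw [hlen, PySem.List.pyRange_zero_natCast,
    pvBridge ineq nk w ok w.length (le_refl _) h,
    List.take_length, pvZipTake]

lemma pvMissingA_eq (w l acc : List Int) (h : acc.length ≤ 1) :
    pvMissingA w l acc =
      if 2 ≤ acc.length + (l.filter (fun i => !(w.contains i))).length then none
      else some (acc ++ l.filter (fun i => !(w.contains i))) := by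
  induction l generalizing acc with
  | nil =>
    rw [show pvMissingA w [] acc = some acc from rfl]
    simp only [List.filter_nil, List.length_nil, Nat.add_zero, List.append_nil]
    rw [if_neg (by omega)]
  | cons i is ih =>
    simp only [pvMissingA, List.filter_cons]
    by_cases hi : (!(w.contains i)) = true
    · simp only [hi, if_true]
      by_cases hacc : acc = []
      · subst hacc
        rw [if_neg (by simp), show ([] : List Int) ++ [i] = [i] from rfl, ih [i] (by simp)]
        simp only [List.length_cons, List.length_nil, List.nil_append]
        by_cases h2 : 1 ≤ (List.filter (fun j => !(w.contains j)) is).length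
        · rw [if_pos (by omega), if_pos (by omega)]
        · rw [if_neg (by omega), if_neg (by omega)]
          simp
      · have h1 : 1 ≤ acc.length := by
          cases acc with
          | nil => exact absurd rfl hacc
          | cons a as => simp
        rw [if_pos hacc, if_pos (by simp only [List.length_cons]; omega)]
    · rw [if_neg hi, if_neg hi, ih _ h]

-- B's max([0]+…) / min([len(inequalities)]+…) are the running folds
lemma pvLoB_eq (ineq : List (Int × List Int)) (nk : Int) (pairs : List (Int × Int)) :
    pvLoB ineq nk pairs = pvLoF ineq nk pairs 0 := by
  unfold pvLoB pvLoF
  rw [PySem.List.max?_id_cons]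
  simp only [Option.getD_some]
  rw [List.foldl_map, ← PySem.List.foldl_if_eq_foldl_filter
      (fun p => (pvRowB ineq nk).contains p.2 || !((pvRowB ineq p.2).contains nk))
      (fun m (p : Int × Int) => max m p.1)]
  rfl

lemma pvHiB_eq (ineq : List (Int × List Int)) (nk : Int) (pairs : List (Int × Int)) :
    pvHiB ineq nk pairs = pvHiF ineq nk pairs (ineq.length : Int) := by
  unfold pvHiB pvHiF
  rw [PySem.List.min?_id_cons]
  simp only [Option.getD_some, PySem.List.len]
  rw [List.foldl_map, ← PySem.List.foldl_if_eq_foldl_filter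
      (fun p => (pvRowB ineq p.2).contains nk || !((pvRowB ineq nk).contains p.2))
      (fun m (p : Int × Int) => min m (p.1 + 1))]
  rfl

def pvLeaf (ineq : List (Int × List Int)) (word : List Int) (lo hi : Int) : List (List Int) :=
  if PySem.List.len (pvMissingB word) > 1 then []
  else if lo ≤ pvXB word ∧ pvXB word < hi then [[pvXB word]]
  else if pvMissingB word = [] ∧ hi = lo + 1 then [[lo]] else []

-- one unfolding of A, written with B's building blocks
lemma pvA_cons (ineq : List (Int × List Int)) (ok word : List Int) (next : Int) (rest : List Int)
    (hw : word.length ≤ ok.length) :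
    inequality_word_helper word (next :: rest) ineq ok =
      (if pvLoF ineq next (word.zip ok) 0 ≥ pvHiF ineq next (word.zip ok) (ineq.length : Int) then []
       else if rest ≠ [] then
         (PySem.List.pyRange (pvLoF ineq next (word.zip ok) 0)
             (pvHiF ineq next (word.zip ok) (ineq.length : Int)) 1).flatMap
           (fun letter => (inequality_word_helper (word ++ [letter]) rest ineq ok).map
             (fun t => letter :: t))
       else pvLeaf ineq word (pvLoF ineq next (word.zip ok) 0)
              (pvHiF ineq next (word.zip ok) (ineq.length : Int))) := by
  have hleni : PySem.List.len ineq = (ineq.length : Int) := by simp [PySem.List.len]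
  conv_lhs => rw [inequality_word_helper]
  rw [hleni, pvBoundsA_eq ineq next word ok hw, pvPairB_eq]
  by_cases hge : pvLoF ineq next (word.zip ok) 0 >= pvHiF ineq next (word.zip ok) (ineq.length : Int)
  · rw [if_pos hge, if_pos hge]
    by_cases hemp : (word.zip ok).isEmpty
    · have hword : word = [] := by
        rw [List.isEmpty_iff, List.zip_eq_nil_iff] at hemp
        rcases hemp with h | h
        · exact h
        · subst h; simpa using hw
      subst hword
      have hlo0 : pvLoF ineq next (List.zip [] ok) 0 = 0 := by simp [pvLoF]
      have hhiC : pvHiF ineq next (List.zip [] ok) (ineq.length : Int) = (ineq.length : Int) := by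
        simp [pvHiF]
      have hnil : ineq = [] := by
        rw [hlo0, hhiC] at hge
        have h0 : ineq.length = 0 := by omega
        exact List.eq_nil_of_length_eq_zero h0
      subst hnil
      rw [if_pos hemp]
      by_cases hr : rest ≠ [] <;>
        simp [hr, pvMissingA, PySem.Set.ofList, PySem.Set.len, PySem.List.len,
          show PySem.List.pyRange 0 0 1 = [] from rfl]
    · rw [if_neg hemp]
  · rw [if_neg hge, if_neg hge]
    split
    · simp_all
    · rename_i s heq
      injection heq with heq
      subst heq
      by_cases hr : rest ≠ []
      · rw [if_pos hr, if_pos hr]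
        show (PySem.List.pyRange _ _ 1).foldl _ [] = _
        rw [PySem.List.foldl_append_eq_flatMap
          (fun letter => (inequality_word_helper (word ++ [letter]) rest ineq ok).map
            (fun w => [letter] ++ w))]
        simp [List.singleton_append]
      · rw [if_neg hr, if_neg hr]
        simp only [pvMissingA_eq, List.length_nil, Nat.zero_add, List.nil_append]
        rw [pvMissingA_eq word _ [] (by simp)]
        simp only [List.length_nil, Nat.zero_add, List.nil_append]
        unfold pvLeaf pvXB pvMissingB pvNB
        by_cases h2 : 2 <= ((PySem.List.pyRange 0
            (PySem.Set.len (PySem.Set.ofList word)) 1).filter (fun i => !(word.contains i))).length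
        · have hgt : PySem.List.len ((PySem.List.pyRange 0
              (PySem.Set.len (PySem.Set.ofList word)) 1).filter (fun i => !(word.contains i))) > 1 := by
            rw [PySem.List.len_eq]; omega
          rw [if_pos h2, if_pos hgt]
        · have hngt : ¬ (PySem.List.len ((PySem.List.pyRange 0
              (PySem.Set.len (PySem.Set.ofList word)) 1).filter (fun i => !(word.contains i))) > 1) := by
            rw [PySem.List.len_eq]; omega
          rw [if_neg h2, if_neg hngt]
          rcases hF : (PySem.List.pyRange 0
              (PySem.Set.len (PySem.Set.ofList word)) 1).filter (fun i => !(word.contains i))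
            with _ | ⟨x0, xs⟩
          · simp [ge_iff_le]
          · have hxs : xs = [] := by
              rw [hF] at h2
              simp only [List.length_cons] at h2
              exact List.eq_nil_of_length_eq_zero (by omega)
            subst hxs
            simp [ge_iff_le]

def pvInv (ineq : List (Int × List Int)) (ok : List Int)
    (s : List Int × List Int × List Int) : Prop :=
  s.2.1 ≠ [] → (s.1.length + s.2.1.length ≤ ok.length + 1 ∨ (s.1 = [] ∧ ineq = []) ∨
    (s.1.length ≤ ok.length ∧
     pvLoF ineq (s.2.1.headD 0) (s.1.zip ok) 0 ≥
       pvHiF ineq (s.2.1.headD 0) (s.1.zip ok) (ineq.length : Int)))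

lemma pvStackLoop_eq (ineq : List (Int × List Int)) (ok : List Int)
    (stack : List (List Int × List Int × List Int)) (out : List (List Int))
    (hinv : ∀ s ∈ stack, pvInv ineq ok s) :
    pvStackLoop ineq ok stack out =
      out ++ stack.flatMap (fun s =>
        (inequality_word_helper s.1 s.2.1 ineq ok).map (fun t => s.2.2 ++ t)) := by
  revert hinv
  induction stack, out using pvStackLoop.induct ineq ok
  case case1 =>
    intro _
    simp [pvStackLoop]
  case case2 =>
    rename_i word pref rest_stack out ih
    intro hinv
    simp only [pvStackLoop]
    rw [ih (fun s hs => hinv s (List.mem_cons_of_mem _ hs))]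
    simp [inequality_word_helper, List.append_assoc]
  case case3 =>
    rename_i word next_key rest pref rest_stack out pairs lo hi h ih
    intro hinv
    have h' : pvLoB ineq next_key (word.zip ok) ≥ pvHiB ineq next_key (word.zip ok) := h
    have hw : word.length ≤ ok.length := by
      rcases hinv _ List.mem_cons_self (by simp) with h | ⟨h, _⟩ | ⟨h, _⟩
      · simp only [List.length_cons] at h; omega
      · subst h; simp
      · exact h
    simp only [pvStackLoop]
    rw [if_pos h', ih (fun s hs => hinv s (List.mem_cons_of_mem _ hs)),
      List.flatMap_cons, pvA_cons ineq ok word next_key rest hw,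
      if_pos (by rw [← pvLoB_eq, ← pvHiB_eq]; exact h')]
    simp
  case case4 =>
    rename_i word next_key rest pref rest_stack out pairs lo hi h1 h2 ih
    intro hinv
    have h' : ¬ pvLoB ineq next_key (word.zip ok) ≥ pvHiB ineq next_key (word.zip ok) := h1
    have hw : word.length ≤ ok.length := by
      rcases hinv _ List.mem_cons_self (by simp) with h | ⟨h, _⟩ | ⟨h, _⟩
      · simp only [List.length_cons] at h; omega
      · subst h; simp
      · exact h
    have hchild : ∀ s ∈ (PySem.List.pyRange (pvLoB ineq next_key (word.zip ok))
        (pvHiB ineq next_key (word.zip ok)) 1).map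
          (fun letter => (word ++ [letter], rest, pref ++ [letter])) ++ rest_stack,
        pvInv ineq ok s := by
      intro s hs
      rcases List.mem_append.mp hs with hs | hs
      · rcases List.mem_map.mp hs with ⟨l, _, rfl⟩
        intro _
        rcases hinv _ List.mem_cons_self (by simp) with hp | ⟨hw0, hieq⟩ | ⟨_, hbe⟩
        · left
          simp only [List.length_cons] at hp
          simp only [List.length_append, List.length_cons, List.length_nil]
          omega
        · exfalso
          apply h'
          subst hw0; subst hieq
          rw [pvLoB_eq, pvHiB_eq]
          simp [pvLoF, pvHiF]
        · exfalso
          apply h'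
          rw [pvLoB_eq, pvHiB_eq]
          simpa using hbe
      · exact hinv s (List.mem_cons_of_mem _ hs)
    simp only [pvStackLoop]
    rw [if_neg h', if_pos h2, ih hchild,
      List.flatMap_cons, pvA_cons ineq ok word next_key rest hw,
      if_neg (by rw [← pvLoB_eq, ← pvHiB_eq]; exact h'), if_pos h2,
      List.flatMap_append]
    rw [← pvLoB_eq, ← pvHiB_eq]
    simp only [List.flatMap_map, List.map_flatMap, List.map_map, Function.comp_def,
      List.append_assoc]
    simp
    try rfl
  case case5 =>
    rename_i word next_key rest pref rest_stack out pairs lo hi h1 h2 h3 ih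
    intro hinv
    have h' : ¬ pvLoB ineq next_key (word.zip ok) ≥ pvHiB ineq next_key (word.zip ok) := h1
    have h3' : PySem.List.len (pvMissingB word) > 1 := h3
    have hw : word.length ≤ ok.length := by
      rcases hinv _ List.mem_cons_self (by simp) with h | ⟨h, _⟩ | ⟨h, _⟩
      · simp only [List.length_cons] at h; omega
      · subst h; simp
      · exact h
    simp only [pvStackLoop]
    rw [if_neg h', if_neg h2, if_pos h3', ih (fun s hs => hinv s (List.mem_cons_of_mem _ hs)),
      List.flatMap_cons, pvA_cons ineq ok word next_key rest hw,
      if_neg (by rw [← pvLoB_eq, ← pvHiB_eq]; exact h'), if_neg h2]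
    unfold pvLeaf
    rw [if_pos h3']
    simp
  case case6 =>
    rename_i word next_key rest pref rest_stack out pairs lo hi h1 h2 h3 h4 ih
    intro hinv
    have h' : ¬ pvLoB ineq next_key (word.zip ok) ≥ pvHiB ineq next_key (word.zip ok) := h1
    have h3' : ¬ PySem.List.len (pvMissingB word) > 1 := h3
    have h4' : pvLoB ineq next_key (word.zip ok) ≤ pvXB word ∧
        pvXB word < pvHiB ineq next_key (word.zip ok) := h4
    have hw : word.length ≤ ok.length := by
      rcases hinv _ List.mem_cons_self (by simp) with h | ⟨h, _⟩ | ⟨h, _⟩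
      · simp only [List.length_cons] at h; omega
      · subst h; simp
      · exact h
    simp only [pvStackLoop]
    rw [if_neg h', if_neg h2, if_neg h3', if_pos h4',
      ih (fun s hs => hinv s (List.mem_cons_of_mem _ hs)),
      List.flatMap_cons, pvA_cons ineq ok word next_key rest hw,
      if_neg (by rw [← pvLoB_eq, ← pvHiB_eq]; exact h'), if_neg h2]
    unfold pvLeaf
    rw [if_neg h3', if_pos (by rw [← pvLoB_eq, ← pvHiB_eq]; exact h4')]
    simp [List.append_assoc]
  case case7 =>
    rename_i word next_key rest pref rest_stack out pairs lo hi h1 h2 h3 h4 h5 ih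
    intro hinv
    have h' : ¬ pvLoB ineq next_key (word.zip ok) ≥ pvHiB ineq next_key (word.zip ok) := h1
    have h3' : ¬ PySem.List.len (pvMissingB word) > 1 := h3
    have h4' : ¬ (pvLoB ineq next_key (word.zip ok) ≤ pvXB word ∧
        pvXB word < pvHiB ineq next_key (word.zip ok)) := h4
    have h5' : pvMissingB word = [] ∧
        pvHiB ineq next_key (word.zip ok) = pvLoB ineq next_key (word.zip ok) + 1 := h5
    have hw : word.length ≤ ok.length := by
      rcases hinv _ List.mem_cons_self (by simp) with h | ⟨h, _⟩ | ⟨h, _⟩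
      · simp only [List.length_cons] at h; omega
      · subst h; simp
      · exact h
    simp only [pvStackLoop]
    rw [if_neg h', if_neg h2, if_neg h3', if_neg h4', if_pos h5',
      ih (fun s hs => hinv s (List.mem_cons_of_mem _ hs)),
      List.flatMap_cons, pvA_cons ineq ok word next_key rest hw,
      if_neg (by rw [← pvLoB_eq, ← pvHiB_eq]; exact h'), if_neg h2]
    unfold pvLeaf
    rw [if_neg h3', if_neg (by rw [← pvLoB_eq, ← pvHiB_eq]; exact h4'),
      if_pos (by rw [← pvLoB_eq, ← pvHiB_eq]; exact h5')]
    rw [← pvLoB_eq]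
    simp [List.append_assoc]
    try rfl
  case case8 =>
    rename_i word next_key rest pref rest_stack out pairs lo hi h1 h2 h3 h4 h5 ih
    intro hinv
    have h' : ¬ pvLoB ineq next_key (word.zip ok) ≥ pvHiB ineq next_key (word.zip ok) := h1
    have h3' : ¬ PySem.List.len (pvMissingB word) > 1 := h3
    have h4' : ¬ (pvLoB ineq next_key (word.zip ok) ≤ pvXB word ∧
        pvXB word < pvHiB ineq next_key (word.zip ok)) := h4
    have h5' : ¬ (pvMissingB word = [] ∧
        pvHiB ineq next_key (word.zip ok) = pvLoB ineq next_key (word.zip ok) + 1) := h5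
    have hw : word.length ≤ ok.length := by
      rcases hinv _ List.mem_cons_self (by simp) with h | ⟨h, _⟩ | ⟨h, _⟩
      · simp only [List.length_cons] at h; omega
      · subst h; simp
      · exact h
    simp only [pvStackLoop]
    rw [if_neg h', if_neg h2, if_neg h3', if_neg h4', if_neg h5',
      ih (fun s hs => hinv s (List.mem_cons_of_mem _ hs)),
      List.flatMap_cons, pvA_cons ineq ok word next_key rest hw,
      if_neg (by rw [← pvLoB_eq, ← pvHiB_eq]; exact h'), if_neg h2]
    unfold pvLeaf
    rw [if_neg h3', if_neg (by rw [← pvLoB_eq, ← pvHiB_eq]; exact h4'),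
      if_neg (by rw [← pvLoB_eq, ← pvHiB_eq]; exact h5')]
    simp

-- ===== VERDICT (by name: the statement is the Claim_ definition above) =====
theorem inequality_word_helper_spec : Claim_equal_inequality_word_helper := by
  intro w ks ineq ok _ hpre
  unfold Spec_inequality_word_helper inequality_word_helper_alt
  have hinv : ∀ s ∈ [(w, ks, ([] : List Int))], pvInv ineq ok s := by
    intro s hs
    simp only [List.mem_singleton] at hs
    subst hs
    intro hne
    rcases hpre with h | ⟨h1, h2⟩ | ⟨h1, _, _⟩ | ⟨_, h1, _, _, h2⟩
    · exact absurd h hne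
    · exact Or.inr (Or.inl ⟨h1, h2⟩)
    · exact Or.inl h1
    · exact Or.inr (Or.inr ⟨h1, h2⟩)
  rw [pvStackLoop_eq ineq ok _ _ hinv]
  simp
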